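-- pv_equiv track=rewrite | github.com/PJPDQ/eBRoS | dummydata/misc.py | filter_arcs
-- ===== SOURCE A (Python) =====
-- def filter_arcs(arcs, nodes, cs, considered_node=None):
--     nodes = nodes + [considered_node]
--     arcs = dict(filter(lambda x: x[0][0] in nodes and x[0][1] in nodes, arcs.items()))
--     res = dict(filter(lambda x: x[0][1] in nodes, arcs.items()))
--     for idx in range(len(nodes)-1):
--         i = nodes[idx]
--         j = nodes[idx+1]
--         if j == 0:
--             tmp = dict(filter(lambda x: x[0][0] == i, arcs.items()))
--             res = {**res, **tmp}
--         elif i in cs or j in cs: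
--             tmp = dict(filter(lambda x: x[0][0] == i or x[0][1] == j, arcs.items()))
--             res = {**res, **tmp}
--         else:
--             tmp = dict(filter(lambda x: x[0][0] == i and x[0][1] == j, arcs.items()))
--             res = {**res, **tmp}
--     return res
-- ===== SOURCE B (Python) =====
-- def filter_arcs(arcs, nodes, cs, considered_node=None):
--     # A's per-pair loop only re-merges subsets of the already-filtered dict
--     # (values unchanged, no new keys), so the result is exactly the arcs whose
--     # both endpoints lie in nodes + [considered_node] -- one pass, no loop over node pairs.
--     ns = set(nodes)
--     ns.add(considered_node)
--     return {k: v for k, v in arcs.items() if k[0] in ns and k[1] in ns}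
-- ===== Notes on version B (the rewrite author's own statement) =====
-- stated objective: faster
-- what changed: A rebuilds and re-merges filtered sub-dicts for every consecutive node pair, but each merge only re-inserts entries already present with the same value, so B replaces the whole loop with a single endpoint-membership filter over arcs using a set of nodes.
import Mathlib
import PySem

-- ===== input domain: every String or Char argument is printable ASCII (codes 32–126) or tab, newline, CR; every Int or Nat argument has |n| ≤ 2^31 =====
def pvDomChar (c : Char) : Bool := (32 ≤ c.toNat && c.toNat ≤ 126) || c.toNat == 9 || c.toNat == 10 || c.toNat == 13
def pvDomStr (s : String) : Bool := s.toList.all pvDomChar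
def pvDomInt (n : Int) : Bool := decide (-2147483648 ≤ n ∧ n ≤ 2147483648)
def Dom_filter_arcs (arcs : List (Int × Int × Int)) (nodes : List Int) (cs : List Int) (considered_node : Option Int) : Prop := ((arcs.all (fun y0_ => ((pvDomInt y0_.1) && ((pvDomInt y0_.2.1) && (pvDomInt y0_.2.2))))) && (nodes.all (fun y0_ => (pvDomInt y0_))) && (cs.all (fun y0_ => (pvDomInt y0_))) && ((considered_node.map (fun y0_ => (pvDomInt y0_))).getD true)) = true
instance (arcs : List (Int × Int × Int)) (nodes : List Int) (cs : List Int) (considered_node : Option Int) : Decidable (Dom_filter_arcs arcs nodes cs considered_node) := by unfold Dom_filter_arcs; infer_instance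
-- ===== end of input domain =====

-- B replaces A's per-node-pair rebuild-and-merge loop (which never changes the result)
-- by a single endpoint-membership filter over the arcs; objective: faster.
-- arcs is a Python dict keyed by (source, target); each triple (a, b, c) is the item ((a, b), c).

-- ===== PORT A =====
-- triple of the assoc list ↔ dict item ((src, tgt), value)
def pvToItem (t : Int × Int × Int) : (Int × Int) × Int := ((t.1, t.2.1), t.2.2)
def pvToTriple (p : (Int × Int) × Int) : Int × Int × Int := (p.1.1, p.1.2, p.2)

def filter_arcs (arcs : List (Int × Int × Int)) (nodes : List Int) (cs : List Int) (considered_node : Option Int) : List (Int × Int × Int) :=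
  -- nodes = nodes + [considered_node]  (a heterogeneous int/None list → List (Option Int))
  let ns : List (Option Int) := nodes.map some ++ [considered_node]
  -- the dict argument; its item keys are distinct under Pre_filter_arcs
  let d0 : PySem.Dict (Int × Int) Int := PySem.Dict.mk (arcs.map pvToItem)
  -- arcs = dict(filter(lambda x: x[0][0] in nodes and x[0][1] in nodes, arcs.items()))
  -- dict(filter(...)) ported as Dict.mk of the filtered item list: exact, the keys are distinct (Pre_)
  let arcs2 : PySem.Dict (Int × Int) Int :=
    PySem.Dict.mk (d0.items.filter (fun x => ns.contains (some x.1.1) && ns.contains (some x.1.2)))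
  -- res = dict(filter(lambda x: x[0][1] in nodes, arcs.items()))
  let res0 : PySem.Dict (Int × Int) Int :=
    PySem.Dict.mk (arcs2.items.filter (fun x => ns.contains (some x.1.2)))
  -- for idx in range(len(nodes)-1): ...
  let res := (PySem.List.pyRange 0 ((ns.length : Int) - 1) 1).foldl (fun res idx =>
      -- i = nodes[idx]; j = nodes[idx+1]  (indices always in range for idx in the range)
      let i : Option Int := (PySem.List.pyGet? ns idx).getD none
      let j : Option Int := (PySem.List.pyGet? ns (idx + 1)).getD none
      -- Python: j == 0 (None == 0 is False), i in cs / j in cs (None never equals an int)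
      if j == some 0 then
        let tmp := PySem.Dict.mk (arcs2.items.filter (fun x => some x.1.1 == i))
        PySem.Dict.update res tmp.items          -- res = {**res, **tmp}
      else if cs.any (fun c => some c == i) || cs.any (fun c => some c == j) then
        let tmp := PySem.Dict.mk (arcs2.items.filter (fun x => some x.1.1 == i || some x.1.2 == j))
        PySem.Dict.update res tmp.items
      else
        let tmp := PySem.Dict.mk (arcs2.items.filter (fun x => some x.1.1 == i && some x.1.2 == j))
        PySem.Dict.update res tmp.items) res0
  res.items.map pvToTriple

-- ===== PORT B =====
def filter_arcs_alt (arcs : List (Int × Int × Int)) (nodes : List Int) (cs : List Int) (considered_node : Option Int) : List (Int × Int × Int) :=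
  -- ns = set(nodes); ns.add(considered_node)  (None may be added → Set (Option Int))
  let ns : PySem.Set (Option Int) := PySem.Set.add (PySem.Set.ofList (nodes.map some)) considered_node
  -- {k: v for k, v in arcs.items() if k[0] in ns and k[1] in ns}: the items of the argument
  -- dict have distinct keys (Pre_), so the comprehension is exactly the filtered item list
  arcs.filter (fun t => PySem.Set.contains ns (some t.1) && PySem.Set.contains ns (some t.2.1))

-- ===== PRECONDITION & SPEC =====
-- arcs stands for a Python dict keyed by (t.1, t.2.1): an association list with a duplicate
-- key does not represent any dict input of A, so those lists are excluded.
def Pre_filter_arcs (arcs : List (Int × Int × Int)) (nodes : List Int) (cs : List Int) (considered_node : Option Int) : Prop :=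
  (arcs.map (fun t => (t.1, t.2.1))).Nodup
instance (arcs : List (Int × Int × Int)) (nodes : List Int) (cs : List Int) (considered_node : Option Int) : Decidable (Pre_filter_arcs arcs nodes cs considered_node) := by unfold Pre_filter_arcs; infer_instance

def pvWitness_filter_arcs : (List (Int × Int × Int)) × List Int × List Int × Option Int :=
  ([(1, 2, 3), (2, 1, 5), (1, 4, 7)], [1, 2], [2], some 0)

def Spec_filter_arcs (arcs : List (Int × Int × Int)) (nodes : List Int) (cs : List Int) (considered_node : Option Int) (out : List (Int × Int × Int)) : Prop := out = filter_arcs_alt arcs nodes cs considered_node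
instance (arcs : List (Int × Int × Int)) (nodes : List Int) (cs : List Int) (considered_node : Option Int) (out : List (Int × Int × Int)) : Decidable (Spec_filter_arcs arcs nodes cs considered_node out) := by unfold Spec_filter_arcs; infer_instance

-- ===== CLAIM (what is proved, stated in full; the proofs are below) =====
def Claim_equal_filter_arcs : Prop := ∀ (arcs : List (Int × Int × Int)) (nodes : List Int) (cs : List Int) (considered_node : Option Int), Dom_filter_arcs arcs nodes cs considered_node → Pre_filter_arcs arcs nodes cs considered_node → Spec_filter_arcs arcs nodes cs considered_node (filter_arcs arcs nodes cs considered_node)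

-- ===== LEMMAS AND PROOFS =====

-- inserting a (key, value) pair already present in a Nodup-keyed dict changes nothing
theorem pv_insert_mem_self {κ ν : Type} [BEq κ] [LawfulBEq κ] (d : PySem.Dict κ ν) {k : κ} {v : ν}
    (hnd : d.keys.Nodup) (hm : (k, v) ∈ d.items) : d.insert k v = d := by
  apply PySem.Dict.ext
  have hc : d.contains k = true :=
    (PySem.Dict.contains_iff_mem_keys d k).mpr (PySem.Dict.mem_keys_of_mem_items (d := d) hm)
  rw [PySem.Dict.items_insert_of_contains d v hc]
  have : ∀ p ∈ d.items, (if (p.1 == k) = true then (k, v) else p) = p := by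
    intro p hp
    by_cases h : p.1 = k
    · have h1 : d.get? k = some v := PySem.Dict.get?_of_mem_items d hm hnd
      have h2 : d.get? p.1 = some p.2 := PySem.Dict.get?_of_mem_items d (by
        rcases p with ⟨a, b⟩; exact hp) hnd
      rw [h] at h2
      have : p.2 = v := by rw [h1] at h2; exact (Option.some_inj.mp h2).symm
      simp only [h, BEq.rfl, if_true]
      exact Prod.ext h.symm this.symm
    · simp [h]
  calc List.map (fun p => if (p.1 == k) = true then (k, v) else p) d.items
      = List.map id d.items := List.map_congr_left (by intro p hp; simpa using this p hp)
    _ = d.items := List.map_id d.items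

-- updating a Nodup-keyed dict with pairs it already contains changes nothing
theorem pv_update_subset {κ ν : Type} [BEq κ] [LawfulBEq κ] (d : PySem.Dict κ ν) (ps : List (κ × ν))
    (hnd : d.keys.Nodup) (hsub : ∀ p ∈ ps, p ∈ d.items) : PySem.Dict.update d ps = d := by
  induction ps with
  | nil => rfl
  | cons p ps ih =>
    have h1 : d.insert p.1 p.2 = d :=
      pv_insert_mem_self d hnd (by have := hsub p (List.mem_cons_self); simpa using this)
    show PySem.Dict.update (d.insert p.1 p.2) ps = d
    rw [h1]
    exact ih (fun q hq => hsub q (List.mem_cons_of_mem p hq))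

theorem filter_arcs_spec : Claim_equal_filter_arcs := by
  intro arcs nodes cs considered_node _ hpre
  unfold Spec_filter_arcs filter_arcs filter_arcs_alt
  simp only []
  set ns : List (Option Int) := nodes.map some ++ [considered_node] with hns
  set p : ((Int × Int) × Int) → Bool :=
    fun x => ns.contains (some x.1.1) && ns.contains (some x.1.2) with hp
  set L : List ((Int × Int) × Int) := arcs.map pvToItem with hL
  -- keys of the filtered dict are Nodup
  have hkeysL : L.map (·.1) = arcs.map (fun t => (t.1, t.2.1)) := by
    rw [hL, List.map_map]; rfl
  have hndL : (L.map (·.1)).Nodup := by rw [hkeysL]; exact hpre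
  have hndF : ((L.filter p).map (·.1)).Nodup :=
    hndL.sublist (List.Sublist.map _ List.filter_sublist)
  have harcs2keys : (PySem.Dict.mk (L.filter p)).keys = (L.filter p).map (·.1) := rfl
  -- res0 = arcs2 : the second filter keeps everything
  have hres0 : (L.filter p).filter (fun x => ns.contains (some x.1.2)) = L.filter p := by
    apply List.filter_eq_self.mpr
    intro x hx
    have := (List.mem_filter.mp hx).2
    rw [hp] at this
    exact (Bool.and_elim_right this)
  rw [hres0]
  -- the loop never changes the accumulator: each merged tmp is a sub-dict of arcs2
  have hloop : ∀ (l : List Int),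
      l.foldl (fun res idx =>
        let i : Option Int := (PySem.List.pyGet? ns idx).getD none
        let j : Option Int := (PySem.List.pyGet? ns (idx + 1)).getD none
        if j == some 0 then
          PySem.Dict.update res (PySem.Dict.mk ((PySem.Dict.mk (L.filter p)).items.filter
            (fun x => some x.1.1 == i))).items
        else if cs.any (fun c => some c == i) || cs.any (fun c => some c == j) then
          PySem.Dict.update res (PySem.Dict.mk ((PySem.Dict.mk (L.filter p)).items.filter
            (fun x => some x.1.1 == i || some x.1.2 == j))).items
        else
          PySem.Dict.update res (PySem.Dict.mk ((PySem.Dict.mk (L.filter p)).items.filter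
            (fun x => some x.1.1 == i && some x.1.2 == j))).items)
        (PySem.Dict.mk (L.filter p)) = PySem.Dict.mk (L.filter p) := by
    intro l
    induction l with
    | nil => rfl
    | cons idx l ih =>
      rw [List.foldl_cons]
      have hstep : ∀ (q : ((Int × Int) × Int) → Bool),
          PySem.Dict.update (PySem.Dict.mk (L.filter p))
            (PySem.Dict.mk ((PySem.Dict.mk (L.filter p)).items.filter q)).items
          = PySem.Dict.mk (L.filter p) := by
        intro q
        apply pv_update_subset _ _ (by rw [harcs2keys]; exact hndF)
        intro x hx
        exact (List.mem_filter.mp hx).1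
      simp only []
      split_ifs <;> rw [hstep] <;> exact ih
  rw [hloop]
  -- the remaining items, mapped back to triples, are B's one-pass filter
  show (L.filter p).map pvToTriple
      = arcs.filter (fun t =>
          PySem.Set.contains (PySem.Set.add (PySem.Set.ofList (nodes.map some)) considered_node) (some t.1)
          && PySem.Set.contains (PySem.Set.add (PySem.Set.ofList (nodes.map some)) considered_node) (some t.2.1))
  rw [hL, List.filter_map, List.map_map]
  have hround : pvToTriple ∘ pvToItem = id := by
    funext t; rfl
  rw [hround, List.map_id]
  apply List.filter_congr
  intro t _
  -- pointwise: list membership in ns agrees with set membership in set(nodes)+{considered_node}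
  have hmem : ∀ (v : Int),
      ns.contains (some v)
      = PySem.Set.contains (PySem.Set.add (PySem.Set.ofList (nodes.map some)) considered_node) (some v) := by
    intro v
    have h1 : (some v ∈ ns) ↔
        (some v ∈ PySem.Set.add (PySem.Set.ofList (nodes.map some)) considered_node) := by
      rw [hns, PySem.Set.mem_add, PySem.Set.mem_ofList]
      simp [List.mem_append]
    rcases Bool.eq_false_or_eq_true (ns.contains (some v)) with h | h <;>
      rcases Bool.eq_false_or_eq_true
        (PySem.Set.contains (PySem.Set.add (PySem.Set.ofList (nodes.map some)) considered_node) (some v)) with h' | h' <;>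
      simp_all
  show p (pvToItem t)
      = (PySem.Set.contains (PySem.Set.add (PySem.Set.ofList (nodes.map some)) considered_node) (some t.1)
         && PySem.Set.contains (PySem.Set.add (PySem.Set.ofList (nodes.map some)) considered_node) (some t.2.1))
  rw [hp]
  show (ns.contains (some t.1) && ns.contains (some t.2.1)) = _
  rw [hmem t.1, hmem t.2.1]
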